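-- pv_equiv track=rewrite | github.com/tanishaf28/Codedex-March | emoticon.py | emoticons_mood
-- ===== SOURCE A (Python) =====
-- def emoticons_mood(message):
--   # Write your code here 💖
--   message = message.lower()
--
--   happy = [':)', ':p', 'xd', ':3', '<3', '\\m/', ':o']
--   sad = [':(', ":'(", 't(-.-t)']
--
--   score = 0
--   for emo in happy:
--     score += message.count(emo)
--   for emo in sad:
--     score -= message.count(emo)
--
--   return score
-- ===== SOURCE B (Python) =====
-- def emoticons_mood(message):
--   message = message.lower()
--
--   happy = [':)', ':p', 'xd', ':3', '<3', '\\m/', ':o']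
--   sad = [':(', ":'(", 't(-.-t)']
--
--   score = 0
--   for i in range(len(message)):
--     score += sum(message.startswith(emo, i) for emo in happy)
--     score -= sum(message.startswith(emo, i) for emo in sad)
--   return score
-- ===== Notes on version B (the rewrite author's own statement) =====
-- stated objective: alternative
-- what changed: Instead of one library substring-count scan per pattern (10 scans of the message), B makes a single pass over the message indices and tests all happy/sad patterns at each position with startswith, accumulating +1/-1; equal to A because none of the emoticon patterns self-overlaps.
import Mathlib
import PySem

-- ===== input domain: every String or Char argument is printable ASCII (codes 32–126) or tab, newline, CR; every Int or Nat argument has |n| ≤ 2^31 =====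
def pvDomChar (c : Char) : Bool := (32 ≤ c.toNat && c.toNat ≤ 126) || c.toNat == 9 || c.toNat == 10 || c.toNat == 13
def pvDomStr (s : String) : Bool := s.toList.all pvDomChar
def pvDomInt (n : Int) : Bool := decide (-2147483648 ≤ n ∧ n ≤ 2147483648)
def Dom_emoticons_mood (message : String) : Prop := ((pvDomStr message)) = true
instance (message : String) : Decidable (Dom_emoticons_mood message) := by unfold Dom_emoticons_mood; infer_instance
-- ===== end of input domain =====

-- B replaces A's ten per-pattern str.count scans by a single pass over the message
-- indices, testing every pattern with startswith at each position (alternative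
-- decomposition; correct because no pattern self-overlaps).

-- ===== PORT A =====
def emoticons_mood (message : String) : Int :=
  let message := PySem.Str.lower message
  let happy : List String := [":)", ":p", "xd", ":3", "<3", "\\m/", ":o"]
  let sad : List String := [":(", ":'(", "t(-.-t)"]
  let score : Int := happy.foldl (fun score emo => score + (PySem.Str.count message emo : Int)) 0
  sad.foldl (fun score emo => score - (PySem.Str.count message emo : Int)) score

-- ===== PORT B =====
def emoticons_mood_alt (message : String) : Int :=
  let l := PySem.Chars.lower message.toList
  let happy : List (List Char) :=
    [":)".toList, ":p".toList, "xd".toList, ":3".toList, "<3".toList, "\\m/".toList, ":o".toList]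
  let sad : List (List Char) := [":(".toList, ":'(".toList, "t(-.-t)".toList]
  (List.range l.length).foldl (fun score i =>
      score
        + happy.foldl (fun t emo => t + (if PySem.Chars.startswith (l.drop i) emo then (1 : Int) else 0)) 0
        - sad.foldl (fun t emo => t + (if PySem.Chars.startswith (l.drop i) emo then (1 : Int) else 0)) 0)
    0

-- ===== PRECONDITION & SPEC =====
def Spec_emoticons_mood (message : String) (out : Int) : Prop := out = emoticons_mood_alt message
instance (message : String) (out : Int) : Decidable (Spec_emoticons_mood message out) := by unfold Spec_emoticons_mood; infer_instance

-- ===== CLAIM (what is proved, stated in full; the proofs are below) =====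
def Claim_equal_emoticons_mood : Prop := ∀ (message : String), Dom_emoticons_mood message → Spec_emoticons_mood message (emoticons_mood message)

-- ===== LEMMAS AND PROOFS =====

-- number of positions of l at which p matches
def pvCntP (l p : List Char) : Nat :=
  (List.range l.length).countP (fun i => p.isPrefixOf (l.drop i))

-- p has no nonempty proper self-overlap (border)
abbrev pvNoOv (p : List Char) : Prop := ∀ i < p.length, 1 ≤ i → ¬ (p.drop i <+: p)

theorem pvOverlap {p l : List Char} {i : Nat} (hl : p <+: l) (hd : p <+: l.drop i)
    (hi : i < p.length) : p.drop i <+: p := by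
  obtain ⟨r, rfl⟩ := hl
  rw [List.drop_append_of_le_length hi.le] at hd
  obtain ⟨r', hr'⟩ := hd
  have h1 : (p ++ r').take (p.length - i) = p.take (p.length - i) :=
    List.take_append_of_le_length (by omega)
  have h2 : (p.drop i ++ r).take (p.length - i) = p.drop i := by
    have hlen : (p.drop i).length = p.length - i := by simp
    rw [← hlen, List.take_left]
  rw [hr'] at h1
  rw [h2] at h1
  rw [h1]
  exact List.take_prefix _ _

theorem pvCntP_cons (h : Char) (t p : List Char) :
    pvCntP (h :: t) p = (if p.isPrefixOf (h :: t) then 1 else 0) + pvCntP t p := by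
  unfold pvCntP
  rw [List.length_cons, List.range_succ_eq_map, List.countP_cons]
  simp only [List.countP_map, Function.comp_def, List.drop_succ_cons, List.drop_zero]
  by_cases hc : p.isPrefixOf (h :: t) <;> simp [hc] <;> omega

theorem pvCntP_drop (l p : List Char) (k : Nat) (hk : k ≤ l.length) :
    pvCntP l p = (List.range k).countP (fun i => p.isPrefixOf (l.drop i)) + pvCntP (l.drop k) p := by
  induction k with
  | zero => simp [pvCntP]
  | succ k ih =>
    have hk' : k < l.length := by omega
    rw [ih (by omega)]
    have hcons : l.drop k = l[k] :: l.drop (k + 1) := List.drop_eq_getElem_cons hk'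
    rw [hcons, pvCntP_cons, ← hcons, List.range_succ, List.countP_append]
    by_cases hc : p.isPrefixOf (l.drop k) <;> simp [hc] <;> omega

theorem pvGo_eq (p : List Char) (hno : pvNoOv p) (hp : 1 ≤ p.length) :
    ∀ (fuel : Nat) (l : List Char) (acc : Nat), l.length ≤ fuel →
      PySem.Chars.count.go p fuel l acc = acc + pvCntP l p := by
  intro fuel
  induction fuel with
  | zero =>
    intro l acc hl
    have : l = [] := List.eq_nil_of_length_eq_zero (by omega)
    subst this
    rw [PySem.Chars.count.go.eq_def]
    simp [pvCntP]
  | succ fuel ih =>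
    intro l acc hl
    match l with
    | [] =>
      rw [PySem.Chars.count.go.eq_def]
      simp [pvCntP]
    | h :: t =>
      rw [PySem.Chars.count.go.eq_def]
      simp only []
      by_cases hpre : p.isPrefixOf (h :: t)
      · have hpfx : p <+: (h :: t) := by rwa [← List.isPrefixOf_iff_prefix]
        have hlenp : p.length ≤ (h :: t).length := hpfx.length_le
        simp only [hpre, if_true]
        rw [ih _ (acc + 1) (by simp only [List.length_drop, List.length_cons] at hl hlenp ⊢; omega)]
        rw [pvCntP_drop (h :: t) p p.length hlenp]
        have hone : (List.range p.length).countP (fun i => p.isPrefixOf ((h :: t).drop i)) = 1 := by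
          obtain ⟨m, hm⟩ : ∃ m, p.length = m + 1 := ⟨p.length - 1, by omega⟩
          rw [hm, List.range_succ_eq_map, List.countP_cons]
          have hz : (List.range m).countP
              ((fun i => p.isPrefixOf ((h :: t).drop i)) ∘ Nat.succ) = 0 := by
            rw [List.countP_eq_zero]
            intro i hi
            simp only [Function.comp_def]
            intro hcon
            have hdp : p <+: (h :: t).drop (i + 1) := by rwa [← List.isPrefixOf_iff_prefix]
            have hi' : i + 1 < p.length := by simp at hi; omega
            exact hno (i + 1) hi' (by omega) (pvOverlap hpfx hdp hi')
          simp only [List.countP_map, hz]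
          simp [hpre]
        omega
      · simp only [hpre]
        rw [ih t acc (by simp at hl; omega), pvCntP_cons]
        simp [hpre]

theorem pvCount_eq (p l : List Char) (hno : pvNoOv p) (hp : 1 ≤ p.length) :
    PySem.Chars.count l p = pvCntP l p := by
  unfold PySem.Chars.count
  have : p.isEmpty = false := by
    cases p with
    | nil => simp at hp
    | cons a t => simp
  rw [this]
  simp only [Bool.false_eq_true, if_false]
  rw [pvGo_eq p hno hp l.length l 0 (le_refl _)]
  omega

theorem pvSumIte (p : Nat → Bool) : ∀ l : List Nat,
    (l.map (fun x => if p x = true then (1 : Int) else 0)).sum = (l.countP p : Int) := by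
  intro l
  induction l with
  | nil => simp
  | cons x xs ih =>
    simp only [List.map_cons, List.sum_cons, ih, List.countP_cons]
    by_cases hc : p x <;> simp [hc] <;> omega

theorem pvSumSw (L p : List Char) :
    ((List.range L.length).map
        (fun x => if PySem.Chars.startswith (L.drop x) p = true then (1 : Int) else 0)).sum
      = (pvCntP L p : Int) := by
  rw [pvSumIte]
  simp only [PySem.Chars.startswith, pvCntP]

theorem pvFoldl_sub_add (f g : Nat → Int) (xs : List Nat) :
    ∀ a : Int, xs.foldl (fun s i => s + f i - g i) a = a + (xs.map f).sum - (xs.map g).sum := by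
  induction xs with
  | nil => intro a; simp
  | cons x xs ih =>
    intro a
    simp only [List.foldl_cons, List.map_cons, List.sum_cons, ih]
    ring

-- ===== VERDICT (by name: the statement is the Claim_ definition above) =====
theorem emoticons_mood_spec : Claim_equal_emoticons_mood := by
  intro message _
  unfold Spec_emoticons_mood emoticons_mood emoticons_mood_alt
  simp only [List.foldl_cons, List.foldl_nil, PySem.Str.count_eq, PySem.Str.toList_lower]
  rw [pvFoldl_sub_add]
  simp only [PySem.List.sum_map_add_int, List.map_const', List.sum_replicate, smul_zero, pvSumSw]
  rw [pvCount_eq _ _ (by decide) (by decide), pvCount_eq _ _ (by decide) (by decide),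
    pvCount_eq _ _ (by decide) (by decide), pvCount_eq _ _ (by decide) (by decide),
    pvCount_eq _ _ (by decide) (by decide), pvCount_eq _ _ (by decide) (by decide),
    pvCount_eq _ _ (by decide) (by decide), pvCount_eq _ _ (by decide) (by decide),
    pvCount_eq _ _ (by decide) (by decide), pvCount_eq _ _ (by decide) (by decide)]
  ring
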